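-- pv_equiv track=rewrite | github.com/iamnishantchandra/DSA-QA-Using-Python | 10X/Python/Array/Both x.py | bothCountX
-- ===== SOURCE A (Python) =====
-- def bothCountX(string1, string2, x):
--     # Complete this function, and return the list of resultant characters in sorted order
--     s1={}
--     s2={}
--     s3={}
--     a=[]
--     string1=string1.casefold()
--     string2=string2.casefold()
--     for i in range(len(string1)):
--         if string1[i] in s1:
--             s1[string1[i]]+=1
--         else:
--             s1[string1[i]]=1
--     for i in range(len(string2)):
--         if string2[i] in s2:
--             s2[string2[i]]+=1
--         else:
--             s2[string2[i]]=1
--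
--     for i in s1:
--         if i in s1 and i in s2 and s1[i]==x and s2[i]==x:
--             a.append(i)
--     #         s3[i]=min(s1[i],s2[i])
--     # for i in s3:
--     #     if s3[i]==x:
--     #         a.append(i)
--     b=sorted(a)
--     return(b)
-- ===== SOURCE B (Python) =====
-- def bothCountX(string1, string2, x):
--     # Sort each casefolded string, scan runs of equal characters keeping those
--     # of length exactly x (already in sorted order, no duplicates), then
--     # intersect the two sorted run lists with a two-pointer merge.
--     def exact_runs(s):
--         cs = sorted(s.casefold())
--         out = []
--         i = 0
--         n = len(cs)
--         while i < n:
--             j = i + 1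
--             while j < n and cs[j] == cs[i]:
--                 j += 1
--             if j - i == x:
--                 out.append(cs[i])
--             i = j
--         return out
--     r1 = exact_runs(string1)
--     r2 = exact_runs(string2)
--     res = []
--     i = j = 0
--     while i < len(r1) and j < len(r2):
--         if r1[i] == r2[j]:
--             res.append(r1[i])
--             i += 1
--             j += 1
--         elif r1[i] < r2[j]:
--             i += 1
--         else:
--             j += 1
--     return res
-- ===== Notes on version B (the rewrite author's own statement) =====
-- stated objective: alternative
-- what changed: Replaces A's two counting dicts and per-key filter-then-sort by a sort-then-scan algorithm: sort each casefolded string, run-length-scan for runs of length exactly x (yielding sorted duplicate-free lists), and intersect them with a two-pointer merge, so no dict/counter and no final sort exist.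
import Mathlib
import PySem

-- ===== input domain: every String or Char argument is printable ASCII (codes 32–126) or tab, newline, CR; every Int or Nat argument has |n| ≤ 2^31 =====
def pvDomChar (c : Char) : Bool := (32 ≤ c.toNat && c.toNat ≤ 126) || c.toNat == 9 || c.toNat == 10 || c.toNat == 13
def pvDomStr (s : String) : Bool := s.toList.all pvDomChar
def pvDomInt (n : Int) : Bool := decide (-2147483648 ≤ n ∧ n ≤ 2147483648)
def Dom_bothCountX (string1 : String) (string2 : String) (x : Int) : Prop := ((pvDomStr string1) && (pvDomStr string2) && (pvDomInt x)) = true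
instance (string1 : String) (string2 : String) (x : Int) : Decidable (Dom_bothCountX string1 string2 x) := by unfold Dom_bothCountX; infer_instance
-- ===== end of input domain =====

-- B replaces A's counting dicts + per-key filter + final sort by sort-then-run-length-scan on each
-- string and a two-pointer merge intersection of the two sorted run lists (objective: alternative).
-- Python's 1-character strings s[i] are modelled as one-char Lean Strings; casefold = lower on the
-- ASCII domain.

-- ===== PORT A =====
def bothCountX (string1 : String) (string2 : String) (x : Int) : List String :=
  let t1 := (PySem.Str.lower string1).toList.map (fun c => String.ofList [c])
  let t2 := (PySem.Str.lower string2).toList.map (fun c => String.ofList [c])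
  -- for i in range(len(string1)): count string1[i] in s1
  let s1 := (PySem.List.pyRange 0 (PySem.List.len t1)).foldl
      (fun d i =>
        let c := PySem.List.pyGetD t1 i ""
        if d.contains c then d.insert c (d.getD c 0 + 1) else d.insert c 1)
      PySem.Dict.empty
  let s2 := (PySem.List.pyRange 0 (PySem.List.len t2)).foldl
      (fun d i =>
        let c := PySem.List.pyGetD t2 i ""
        if d.contains c then d.insert c (d.getD c 0 + 1) else d.insert c 1)
      PySem.Dict.empty
  -- for i in s1: if i in s1 and i in s2 and s1[i]==x and s2[i]==x: a.append(i)
  -- (s1[i]/s2[i] ported as getD: the 'in' guards ensure the key is present, so no KeyError)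
  let a := s1.keys.foldl
      (fun acc c =>
        if s1.contains c && s2.contains c && (s1.getD c 0 == x) && (s2.getD c 0 == x)
        then acc ++ [c] else acc) []
  PySem.List.sorted a (fun s => s) false

-- ===== PORT B =====
-- inner while loop of exact_runs: the run of cs[i] is cs[i] followed by takeWhile (== cs[i]) of the
-- rest, j - i = its length; the outer loop resumes at the rest (dropWhile)
def pvRuns (x : Int) : List String → List String
  | [] => []
  | c :: rest =>
    if ((1 + (rest.takeWhile (fun d => d == c)).length : Int) == x)
    then c :: pvRuns x (rest.dropWhile (fun d => d == c))
    else pvRuns x (rest.dropWhile (fun d => d == c))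
termination_by l => l.length
decreasing_by all_goals exact Nat.lt_succ_of_le (List.length_dropWhile_le _ _)

-- two-pointer intersection of the two run lists (the while loop over i, j)
def pvMerge : List String → List String → List String
  | [], _ => []
  | _, [] => []
  | a :: as, b :: bs =>
    if a == b then a :: pvMerge as bs
    else if a < b then pvMerge as (b :: bs)
    else pvMerge (a :: as) bs
termination_by r1 r2 => r1.length + r2.length

def bothCountX_alt (string1 : String) (string2 : String) (x : Int) : List String :=
  let t1 := (PySem.Str.lower string1).toList.map (fun c => String.ofList [c])
  let t2 := (PySem.Str.lower string2).toList.map (fun c => String.ofList [c])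
  let r1 := pvRuns x (PySem.List.sorted t1 (fun s => s) false)
  let r2 := pvRuns x (PySem.List.sorted t2 (fun s => s) false)
  pvMerge r1 r2

-- ===== PRECONDITION & SPEC =====
def Spec_bothCountX (string1 : String) (string2 : String) (x : Int) (out : List String) : Prop := out = bothCountX_alt string1 string2 x
instance (string1 : String) (string2 : String) (x : Int) (out : List String) : Decidable (Spec_bothCountX string1 string2 x out) := by unfold Spec_bothCountX; infer_instance

-- ===== CLAIM (what is proved, stated in full; the proofs are below) =====
def Claim_equal_bothCountX : Prop := ∀ (string1 : String) (string2 : String) (x : Int), Dom_bothCountX string1 string2 x → Spec_bothCountX string1 string2 x (bothCountX string1 string2 x)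

-- ===== LEMMAS AND PROOFS =====

-- A's counting loop over indices builds exactly Counter(l).
theorem countLoop_eq_counter (l : List String) :
    (PySem.List.pyRange 0 (PySem.List.len l)).foldl
      (fun d i =>
        let c := PySem.List.pyGetD l i ""
        if d.contains c then d.insert c (d.getD c 0 + 1) else d.insert c 1)
      PySem.Dict.empty = PySem.Dict.counter l := by
  refine (PySem.List.foldl_pyRange_pyGetD l ""
    (fun (d : PySem.Dict String Int) (c : String) =>
      if d.contains c then d.insert c (d.getD c 0 + 1) else d.insert c 1)
    PySem.Dict.empty le_rfl).trans ?_
  have hfun : (fun (d : PySem.Dict String Int) (c : String) =>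
      if d.contains c then d.insert c (d.getD c 0 + 1) else d.insert c 1)
      = fun d c => d.insert c (d.getD c 0 + 1) := by
    funext d c
    by_cases h : d.contains c = true
    · simp [h]
    · simp only [Bool.not_eq_true] at h
      simp [h, PySem.Dict.getD_of_not_contains d (0 : Int) h]
  simp only [Int.toNat_zero, List.drop_zero, hfun,
    PySem.Dict.foldl_insert_getD_add_one_eq_counter]

theorem pvMerge_sublist (r1 r2 : List String) : (pvMerge r1 r2).Sublist r1 := by
  fun_induction pvMerge r1 r2 with
  | case1 => simp
  | case2 => simp
  | case3 a as b bs h ih => exact ih.cons₂ a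
  | case4 a as b bs h h' ih => exact ih.cons a
  | case5 a as b bs h h' ih => exact ih

-- helper: in a ≤-sorted cons list, everything after the dropped run is strictly greater
theorem dropWhile_gt (c : String) (rest : List String) (h_le : ∀ d ∈ rest, c ≤ d)
    (h_rest : rest.Pairwise (· ≤ ·)) :
    ∀ e ∈ rest.dropWhile (fun d => d == c), c < e := by
  intro e he
  rcases hdw : rest.dropWhile (fun d => d == c) with _ | ⟨hd, tl⟩
  · simp [hdw] at he
  · have hhd : (hd == c) = false := by
      have := List.head_dropWhile_not (fun d => d == c) (l := rest) (by simp [hdw])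
      simpa [hdw] using this
    have hhdc : c < hd := by
      have hmem : hd ∈ rest := by
        have hmem0 : hd ∈ rest.dropWhile (fun d => d == c) := by rw [hdw]; simp
        exact (List.dropWhile_sublist (fun d => d == c)).subset hmem0
      exact lt_of_le_of_ne (h_le hd hmem) (Ne.symm (beq_eq_false_iff_ne.mp hhd))
    rw [hdw] at he
    rcases List.mem_cons.mp he with rfl | htl
    · exact hhdc
    · have hpw : (hd :: tl).Pairwise (· ≤ ·) := hdw ▸ h_rest.sublist (List.dropWhile_sublist _)
      exact lt_of_lt_of_le hhdc ((List.pairwise_cons.mp hpw).1 e htl)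

theorem pvRuns_spec (x : Int) (l : List String) (hs : l.Pairwise (· ≤ ·)) :
    (pvRuns x l).Pairwise (· < ·) ∧ ∀ c, (c ∈ pvRuns x l ↔ c ∈ l ∧ (l.count c : Int) = x) := by
  fun_induction pvRuns x l with
  | case1 => simp
  | case2 c rest hcond ih =>
    rcases List.pairwise_cons.mp hs with ⟨h_le, h_rest⟩
    have hgt := dropWhile_gt c rest h_le h_rest
    obtain ⟨ihp, ihm⟩ := ih (h_rest.sublist (List.dropWhile_sublist _))
    have htw : ∀ e ∈ rest.takeWhile (fun d => d == c), e = c := by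
      intro e he
      have hpe := List.mem_takeWhile_imp he
      simpa using hpe
    have hcount : ((c :: rest).count c : Int) = x := by
      rw [List.count_cons_self]
      have hsplit : rest.count c = (rest.takeWhile (fun d => d == c)).count c
          + (rest.dropWhile (fun d => d == c)).count c := by
        conv_lhs => rw [← List.takeWhile_append_dropWhile (p := fun d => d == c) (l := rest)]
        exact List.count_append ..
      have h1 : (rest.takeWhile (fun d => d == c)).count c
          = (rest.takeWhile (fun d => d == c)).length :=
        List.count_eq_length.mpr (fun b hb => (htw b hb).symm)
      have h2 : (rest.dropWhile (fun d => d == c)).count c = 0 :=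
        List.count_eq_zero.mpr (fun hc => lt_irrefl c (hgt c hc))
      have := beq_iff_eq.mp hcond
      push_cast [hsplit, h1, h2]
      omega
    have hcnt_ne : ∀ e, e ≠ c → ((c :: rest).count e : Int)
        = ((rest.dropWhile (fun d => d == c)).count e : Int) := by
      intro e hne
      rw [List.count_cons_of_ne (Ne.symm hne)]
      conv_lhs => rw [← List.takeWhile_append_dropWhile (p := fun d => d == c) (l := rest)]
      rw [List.count_append]
      have : (rest.takeWhile (fun d => d == c)).count e = 0 :=
        List.count_eq_zero.mpr (fun hc => hne (htw e hc))
      simp [this]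
    have hmem_ne : ∀ e, e ≠ c → (e ∈ rest ↔ e ∈ rest.dropWhile (fun d => d == c)) := by
      intro e hne
      conv_lhs => rw [← List.takeWhile_append_dropWhile (p := fun d => d == c) (l := rest)]
      simp only [List.mem_append]
      constructor
      · rintro (htwm | h)
        · exact absurd (htw e htwm) hne
        · exact h
      · exact fun h => Or.inr h
    constructor
    · exact List.pairwise_cons.mpr ⟨fun e he => hgt e ((ihm e).mp he).1, ihp⟩
    · intro e
      by_cases hne : e = c
      · subst hne
        exact iff_of_true (by simp) ⟨by simp, hcount⟩
      · simp only [List.mem_cons, hne, false_or]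
        rw [ihm e, ← hcnt_ne e hne, hmem_ne e hne]
  | case3 c rest hcond ih =>
    rcases List.pairwise_cons.mp hs with ⟨h_le, h_rest⟩
    have hgt := dropWhile_gt c rest h_le h_rest
    obtain ⟨ihp, ihm⟩ := ih (h_rest.sublist (List.dropWhile_sublist _))
    have htw : ∀ e ∈ rest.takeWhile (fun d => d == c), e = c := by
      intro e he
      have hpe := List.mem_takeWhile_imp he
      simpa using hpe
    -- count c ≠ x here
    have hcount : ((c :: rest).count c : Int) ≠ x := by
      rw [List.count_cons_self]
      have hsplit : rest.count c = (rest.takeWhile (fun d => d == c)).count c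
          + (rest.dropWhile (fun d => d == c)).count c := by
        conv_lhs => rw [← List.takeWhile_append_dropWhile (p := fun d => d == c) (l := rest)]
        exact List.count_append ..
      have h1 : (rest.takeWhile (fun d => d == c)).count c
          = (rest.takeWhile (fun d => d == c)).length :=
        List.count_eq_length.mpr (fun b hb => (htw b hb).symm)
      have h2 : (rest.dropWhile (fun d => d == c)).count c = 0 :=
        List.count_eq_zero.mpr (fun hc => lt_irrefl c (hgt c hc))
      have : (1 + ((rest.takeWhile (fun d => d == c)).length : Int)) ≠ x := by
        simpa using hcond
      push_cast [hsplit, h1, h2]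
      omega
    have hcnt_ne : ∀ e, e ≠ c → ((c :: rest).count e : Int)
        = ((rest.dropWhile (fun d => d == c)).count e : Int) := by
      intro e hne
      rw [List.count_cons_of_ne (Ne.symm hne)]
      conv_lhs => rw [← List.takeWhile_append_dropWhile (p := fun d => d == c) (l := rest)]
      rw [List.count_append]
      have : (rest.takeWhile (fun d => d == c)).count e = 0 :=
        List.count_eq_zero.mpr (fun hc => hne (htw e hc))
      simp [this]
    have hmem_ne : ∀ e, e ≠ c → (e ∈ rest ↔ e ∈ rest.dropWhile (fun d => d == c)) := by
      intro e hne
      conv_lhs => rw [← List.takeWhile_append_dropWhile (p := fun d => d == c) (l := rest)]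
      simp only [List.mem_append]
      constructor
      · rintro (htwm | h)
        · exact absurd (htw e htwm) hne
        · exact h
      · exact fun h => Or.inr h
    refine ⟨ihp, fun e => ?_⟩
    by_cases hne : e = c
    · rw [ihm e]
      have hnd : e ∉ rest.dropWhile (fun d => d == c) := fun hc => by
        have := hgt e hc; rw [hne] at this; exact lt_irrefl c this
      exact iff_of_false (fun h => hnd h.1) (fun h => hcount (hne ▸ h.2))
    · simp only [List.mem_cons, hne, false_or]
      rw [ihm e, ← hcnt_ne e hne, hmem_ne e hne]

theorem mem_pvMerge (r1 r2 : List String) (h1 : r1.Pairwise (· < ·)) (h2 : r2.Pairwise (· < ·))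
    (c : String) : c ∈ pvMerge r1 r2 ↔ c ∈ r1 ∧ c ∈ r2 := by
  fun_induction pvMerge r1 r2 with
  | case1 => simp
  | case2 => simp
  | case3 a as b bs h ih =>
    have hab : a = b := beq_iff_eq.mp h
    subst hab
    rw [List.mem_cons, ih (List.pairwise_cons.mp h1).2 (List.pairwise_cons.mp h2).2]
    simp only [List.mem_cons]
    by_cases hca : c = a
    · simp [hca]
    · simp [hca]
  | case4 a as b bs h h' ih =>
    have hlt : a < b := by simpa using h'
    rw [ih (List.pairwise_cons.mp h1).2 h2]
    have hnb : a ∉ b :: bs := by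
      intro hm
      rcases List.mem_cons.mp hm with rfl | hbs
      · exact lt_irrefl a hlt
      · exact lt_irrefl a (hlt.trans ((List.pairwise_cons.mp h2).1 a hbs))
    constructor
    · rintro ⟨ha', hb'⟩; exact ⟨List.mem_cons_of_mem a ha', hb'⟩
    · rintro ⟨ha', hb'⟩
      rcases List.mem_cons.mp ha' with rfl | ha''
      · exact absurd hb' hnb
      · exact ⟨ha'', hb'⟩
  | case5 a as b bs h h' ih =>
    have hlt : b < a := by
      rcases lt_trichotomy a b with hl | he | hg
      · exact absurd hl (by simpa using h')
      · exact absurd he (by simpa using h)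
      · exact hg
    rw [ih h1 (List.pairwise_cons.mp h2).2]
    have hnb : b ∉ a :: as := by
      intro hm
      rcases List.mem_cons.mp hm with rfl | has
      · exact lt_irrefl b hlt
      · exact lt_irrefl b (hlt.trans ((List.pairwise_cons.mp h1).1 b has))
    constructor
    · rintro ⟨ha', hb'⟩; exact ⟨ha', List.mem_cons_of_mem b hb'⟩
    · rintro ⟨ha', hb'⟩
      rcases List.mem_cons.mp hb' with rfl | hb''
      · exact absurd ha' hnb
      · exact ⟨ha', hb''⟩

set_option maxHeartbeats 1000000 in
theorem bothCountX_spec : Claim_equal_bothCountX := by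
  intro string1 string2 x _
  unfold Spec_bothCountX bothCountX bothCountX_alt
  simp only [countLoop_eq_counter]
  set t1 := (PySem.Str.lower string1).toList.map (fun c => String.ofList [c]) with ht1
  set t2 := (PySem.Str.lower string2).toList.map (fun c => String.ofList [c]) with ht2
  rw [PySem.List.foldl_append_if
      (fun c => (PySem.Dict.counter t1).contains c && (PySem.Dict.counter t2).contains c &&
        ((PySem.Dict.counter t1).getD c 0 == x) && ((PySem.Dict.counter t2).getD c 0 == x))
      (fun c => c)]
  rw [List.nil_append, List.map_id_fun', id_eq, PySem.Dict.keys_counter]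
  -- name the pieces of B
  obtain ⟨hp1, hm1⟩ := pvRuns_spec x (PySem.List.sorted t1 (fun s => s) false)
    (by simpa using PySem.List.sorted_pairwise t1 (fun s => s))
  obtain ⟨hp2, hm2⟩ := pvRuns_spec x (PySem.List.sorted t2 (fun s => s) false)
    (by simpa using PySem.List.sorted_pairwise t2 (fun s => s))
  apply PySem.List.sorted_eq_of_perm_of_pairwise_lt
  · -- permutation: both sides are Nodup with the same members
    rw [List.perm_ext_iff_of_nodup ((hp1.sublist (pvMerge_sublist _ _)).imp ne_of_lt)
      ((PySem.Set.nodup_ofList t1).filter _)]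
    intro c
    rw [mem_pvMerge _ _ hp1 hp2, hm1, hm2, List.mem_filter]
    simp only [PySem.List.mem_sorted, (PySem.List.sorted_perm t1 (fun s => s) false).count_eq,
      (PySem.List.sorted_perm t2 (fun s => s) false).count_eq, PySem.Set.mem_ofList,
      Bool.and_eq_true, PySem.Dict.contains_counter, PySem.Dict.getD_counter, beq_iff_eq,
      List.contains_eq_mem, decide_eq_true_eq]
    tauto
  · exact (hp1.sublist (pvMerge_sublist _ _))
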